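-- pv_equiv track=rewrite | github.com/timothyjlaurent/ie-reader | back-end/src/ie_reader/app.py | bio_tag_array_to_pos_dict
-- ===== SOURCE A (Python) =====
-- def bio_tag_array_to_pos_dict(bio_str_array, offset=0):
--     output = {}
--     for i_init, elem in enumerate(bio_str_array):
--         i = i_init + offset
--         if len(elem) > 1:
--             tag = elem[2:]
--             if tag not in output:
--                 output[tag] = [i, i]
--             else:
--                 output[tag][1] = i
--     return output
-- ===== SOURCE B (Python) =====
-- def bio_tag_array_to_pos_dict(bio_str_array, offset=0):
--     # Collect ALL positions of each tag in one pass, then reduce each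
--     # position list to [first, last].  Keys keep first-appearance order.
--     positions = {}
--     for i, elem in enumerate(bio_str_array, offset):
--         if len(elem) > 1:
--             positions.setdefault(elem[2:], []).append(i)
--     return {tag: [idx[0], idx[-1]] for tag, idx in positions.items()}
-- ===== Notes on version B (the rewrite author's own statement) =====
-- stated objective: alternative
-- what changed: B first groups every index under its tag in a dict of full position lists (one grouping pass), then a second pass reduces each list to [first, last], instead of A's in-place maintenance of a [first, last] pair per tag inside the single loop.
import Mathlib
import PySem

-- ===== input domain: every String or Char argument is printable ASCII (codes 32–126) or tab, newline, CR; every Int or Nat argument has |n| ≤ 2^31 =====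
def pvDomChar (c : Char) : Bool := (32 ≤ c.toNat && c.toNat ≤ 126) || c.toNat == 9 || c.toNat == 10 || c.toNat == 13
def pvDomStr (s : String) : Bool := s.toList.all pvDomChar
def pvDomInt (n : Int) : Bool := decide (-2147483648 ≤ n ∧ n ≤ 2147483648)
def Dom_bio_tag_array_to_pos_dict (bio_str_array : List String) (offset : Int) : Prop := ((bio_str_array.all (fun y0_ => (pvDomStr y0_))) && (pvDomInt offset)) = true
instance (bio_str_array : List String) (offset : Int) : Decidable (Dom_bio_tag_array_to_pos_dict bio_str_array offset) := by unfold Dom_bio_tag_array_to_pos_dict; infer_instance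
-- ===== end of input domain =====

-- B groups all indices per tag in one pass, then reduces each group to [first, last]; alternative decomposition, same cost as A.


-- ===== PORT A =====
def bio_tag_array_to_pos_dict (bio_str_array : List String) (offset : Int) : List (String × List Int) :=
  ((PySem.List.enumerate bio_str_array 0).foldl
    (fun output p =>
      let i := p.1 + offset
      if 1 < PySem.Str.len p.2 then
        let tag := PySem.Str.slice p.2 (some 2) none
        if output.contains tag = false then
          output.insert tag [i, i]
        else
          -- output[tag][1] = i : overwrite index 1 of the stored pair in place (tag is present here, so the default [] is never used)
          output.modify tag [] (fun v => v.set 1 i)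
      else output)
    PySem.Dict.empty).items

-- ===== PORT B =====
def bio_tag_array_to_pos_dict_alt (bio_str_array : List String) (offset : Int) : List (String × List Int) :=
  let positions := (PySem.List.enumerate bio_str_array offset).foldl
    (fun d p =>
      if 1 < PySem.Str.len p.2 then
        -- positions.setdefault(tag, []).append(i) : d[tag] becomes d.get(tag, []) + [i], i.e. Dict.modify — exact
        d.modify (PySem.Str.slice p.2 (some 2) none) [] (fun l => l ++ [p.1])
      else d)
    PySem.Dict.empty
  -- idx is nonempty for every stored tag, so pyGetD's default 0 is never used — exact for idx[0] and idx[-1]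
  positions.items.map (fun q => (q.1, [PySem.List.pyGetD q.2 0 0, PySem.List.pyGetD q.2 (-1) 0]))

-- ===== PRECONDITION & SPEC =====
def Spec_bio_tag_array_to_pos_dict (bio_str_array : List String) (offset : Int) (out : List (String × List Int)) : Prop := out = bio_tag_array_to_pos_dict_alt bio_str_array offset
instance (bio_str_array : List String) (offset : Int) (out : List (String × List Int)) : Decidable (Spec_bio_tag_array_to_pos_dict bio_str_array offset out) := by unfold Spec_bio_tag_array_to_pos_dict; infer_instance

-- ===== CLAIM (what is proved, stated in full; the proofs are below) =====
def Claim_equal_bio_tag_array_to_pos_dict : Prop := ∀ (bio_str_array : List String) (offset : Int), Dom_bio_tag_array_to_pos_dict bio_str_array offset → Spec_bio_tag_array_to_pos_dict bio_str_array offset (bio_tag_array_to_pos_dict bio_str_array offset)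

-- ===== LEMMAS AND PROOFS =====

-- shift the start of an enumeration
theorem pv_enumerate_shift (xs : List String) (a b : Int) :
    PySem.List.enumerate xs (a + b) = (PySem.List.enumerate xs a).map (fun p => (p.1 + b, p.2)) := by
  induction xs generalizing a with
  | nil => simp [PySem.List.enumerate_nil]
  | cons x xs ih =>
      simp only [PySem.List.enumerate_cons, List.map_cons]
      have : a + b + 1 = (a + 1) + b := by ring
      rw [this, ih]

-- a fold whose body acts only when c holds, through a key/value abstraction
theorem pv_foldl_filter_map {α β γ : Type} (c : α → Prop) [DecidablePred c] (h : α → γ) (g : β → γ → β) :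
    ∀ (l : List α) (init : β),
      l.foldl (fun d x => if c x then g d (h x) else d) init
        = ((l.filter (fun x => decide (c x))).map h).foldl g init := by
  intro l
  induction l with
  | nil => intro init; simp
  | cons x xs ih =>
      intro init
      by_cases hc : c x <;> simp [hc, ih]

-- the A-side step, written as a single insert
theorem pv_stepA_eq (d : PySem.Dict String (List Int)) (t : String) (v : Int) :
    (if d.contains t = false then d.insert t [v, v] else d.modify t [] (fun w => w.set 1 v))
      = d.insert t (if d.contains t = false then [v, v] else (d.getD t []).set 1 v) := by
  by_cases hc : d.contains t = false <;> simp [hc, PySem.Dict.modify]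

theorem pv_headI_append {l : List Int} (h : l ≠ []) (m : List Int) : (l ++ m).headI = l.headI := by
  cases l with
  | nil => exact absurd rfl h
  | cons a l => simp

theorem pv_getLastI_concat (l : List Int) (v : Int) : (l ++ [v]).getLastI = v := by
  simp [List.getLastI_eq_getLast?_getD]

theorem pv_pyGetD_zero {l : List Int} (h : l ≠ []) : PySem.List.pyGetD l 0 0 = l.headI := by
  cases l with
  | nil => exact absurd rfl h
  | cons a l => simp [PySem.List.pyGetD, PySem.List.pyGet?, PySem.List.pyIdx?]

theorem pv_pyGetD_neg_one {l : List Int} (h : l ≠ []) : PySem.List.pyGetD l (-1) 0 = l.getLastI := by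
  rw [PySem.List.pyGetD_neg_one (h := h), List.getLastI_eq_getLast?_getD, List.getLast?_eq_some_getLast h]
  rfl

-- the main loop invariant: A's dict stores [head, last] of B's position lists
theorem pv_main (ps : List (String × Int)) :
    ∀ (dA dB : PySem.Dict String (List Int)),
      dA.keys = dB.keys → dB.keys.Nodup →
      (∀ t, dB.contains t = true →
        dB.getD t [] ≠ [] ∧ dA.getD t [] = [(dB.getD t []).headI, (dB.getD t []).getLastI]) →
      (let dA' := ps.foldl (fun d q => d.insert q.1 (if d.contains q.1 = false then [q.2, q.2] else (d.getD q.1 []).set 1 q.2)) dA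
       let dB' := ps.foldl (fun d q => d.modify q.1 [] (fun l => l ++ [q.2])) dB
       dA'.keys = dB'.keys ∧ dB'.keys.Nodup ∧
       (∀ t, dB'.contains t = true →
         dB'.getD t [] ≠ [] ∧ dA'.getD t [] = [(dB'.getD t []).headI, (dB'.getD t []).getLastI])) := by
  induction ps with
  | nil => intro dA dB h1 h2 h3; exact ⟨h1, h2, h3⟩
  | cons q ps ih =>
      intro dA dB h1 h2 h3
      simp only [List.foldl_cons]
      have hc : dA.contains q.1 = dB.contains q.1 := by
        rw [PySem.Dict.contains_eq_decide_mem_keys, PySem.Dict.contains_eq_decide_mem_keys, h1]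
      have hmod : dB.modify q.1 [] (fun l => l ++ [q.2]) = dB.insert q.1 (dB.getD q.1 [] ++ [q.2]) := by
        simp [PySem.Dict.modify]
      rw [hmod]
      apply ih
      · -- keys stay equal after the step
        by_cases hb : dB.contains q.1 = true
        · rw [PySem.Dict.keys_insert_of_contains dA _ (hc.trans hb),
              PySem.Dict.keys_insert_of_contains dB _ hb, h1]
        · have hb' : dB.contains q.1 = false := by simpa using hb
          rw [PySem.Dict.keys_insert_of_not_contains dA _ (hc.trans hb'),
              PySem.Dict.keys_insert_of_not_contains dB _ hb', h1]
      · exact PySem.Dict.nodup_keys_insert _ _ _ h2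
      · intro t ht
        by_cases hteq : t = q.1
        · rw [hteq, PySem.Dict.getD_insert_self, PySem.Dict.getD_insert_self]
          by_cases hb : dB.contains q.1 = true
          · obtain ⟨hne, heq⟩ := h3 q.1 hb
            refine ⟨by simp, ?_⟩
            rw [if_neg (by simp [hc, hb]), heq, pv_headI_append hne, pv_getLastI_concat]
            cases hl : dB.getD q.1 [] with
            | nil => exact absurd hl hne
            | cons a l => simp
          · have hb' : dB.contains q.1 = false := by simpa using hb
            rw [PySem.Dict.getD_of_not_contains dB _ hb']
            refine ⟨by simp, ?_⟩
            rw [if_pos (hc.trans hb')]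
            simp [List.getLastI]
        · rw [PySem.Dict.getD_insert_of_ne dB _ _ hteq, PySem.Dict.getD_insert_of_ne dA _ _ hteq]
          apply h3
          have hci := PySem.Dict.contains_insert dB q.1 t (dB.getD q.1 [] ++ [q.2])
          rw [hci] at ht
          simpa [hteq] using ht

-- ===== VERDICT (by name: the statement is the Claim_ definition above) =====
theorem bio_tag_array_to_pos_dict_spec : Claim_equal_bio_tag_array_to_pos_dict := by
  intro xs offset _
  unfold Spec_bio_tag_array_to_pos_dict bio_tag_array_to_pos_dict bio_tag_array_to_pos_dict_alt
  have key1 := pv_foldl_filter_map (fun p : ℤ × String => 1 < PySem.Str.len p.2)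
      (fun p : ℤ × String => (PySem.Str.slice p.2 (some 2) none, p.1 + offset))
      (fun (d : PySem.Dict String (List ℤ)) (q : String × ℤ) => d.insert q.1 (if d.contains q.1 = false then [q.2, q.2] else (d.getD q.1 []).set 1 q.2))
      (PySem.List.enumerate xs 0) PySem.Dict.empty
  have key2 := pv_foldl_filter_map (fun p : ℤ × String => 1 < PySem.Str.len p.2)
      (fun p : ℤ × String => (PySem.Str.slice p.2 (some 2) none, p.1 + offset))
      (fun (d : PySem.Dict String (List ℤ)) (q : String × ℤ) => d.modify q.1 [] (fun l => l ++ [q.2]))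
      (PySem.List.enumerate xs 0) PySem.Dict.empty
  -- A's loop as a fold over the processed (tag, index) pairs
  have hA : (PySem.List.enumerate xs 0).foldl
      (fun output p =>
        let i := p.1 + offset
        if 1 < PySem.Str.len p.2 then
          let tag := PySem.Str.slice p.2 (some 2) none
          if output.contains tag = false then
            output.insert tag [i, i]
          else
            output.modify tag [] (fun v => v.set 1 i)
        else output)
      PySem.Dict.empty
      = (((PySem.List.enumerate xs 0).filter (fun p : ℤ × String => decide (1 < PySem.Str.len p.2))).map (fun p : ℤ × String => (PySem.Str.slice p.2 (some 2) none, p.1 + offset))).foldl (fun (d : PySem.Dict String (List ℤ)) (q : String × ℤ) => d.insert q.1 (if d.contains q.1 = false then [q.2, q.2] else (d.getD q.1 []).set 1 q.2)) PySem.Dict.empty := by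
    rw [← key1]
    apply PySem.List.foldl_congr_mem
    intro acc p _
    split
    · exact pv_stepA_eq acc (PySem.Str.slice p.2 (some 2) none) (p.1 + offset)
    · rfl
  -- B's loop as a fold over the same pairs
  have hB : (PySem.List.enumerate xs offset).foldl
      (fun d p =>
        if 1 < PySem.Str.len p.2 then
          d.modify (PySem.Str.slice p.2 (some 2) none) [] (fun l => l ++ [p.1])
        else d)
      PySem.Dict.empty
      = (((PySem.List.enumerate xs 0).filter (fun p : ℤ × String => decide (1 < PySem.Str.len p.2))).map (fun p : ℤ × String => (PySem.Str.slice p.2 (some 2) none, p.1 + offset))).foldl (fun (d : PySem.Dict String (List ℤ)) (q : String × ℤ) => d.modify q.1 [] (fun l => l ++ [q.2])) PySem.Dict.empty := by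
    have hsh := pv_enumerate_shift xs 0 offset
    rw [zero_add] at hsh
    rw [hsh, List.foldl_map, ← key2]
  rw [hA]
  simp only [hB]
  have hmain := pv_main (((PySem.List.enumerate xs 0).filter (fun p : ℤ × String => decide (1 < PySem.Str.len p.2))).map (fun p : ℤ × String => (PySem.Str.slice p.2 (some 2) none, p.1 + offset))) PySem.Dict.empty PySem.Dict.empty
    (by rfl) (by simp [PySem.Dict.keys_empty]) (by intro t ht; simp [PySem.Dict.contains_empty] at ht)
  obtain ⟨hk, hnd, hval⟩ := hmain
  have hndA : ((((PySem.List.enumerate xs 0).filter (fun p : ℤ × String => decide (1 < PySem.Str.len p.2))).map (fun p : ℤ × String => (PySem.Str.slice p.2 (some 2) none, p.1 + offset))).foldl (fun (d : PySem.Dict String (List ℤ)) (q : String × ℤ) => d.insert q.1 (if d.contains q.1 = false then [q.2, q.2] else (d.getD q.1 []).set 1 q.2)) PySem.Dict.empty).keys.Nodup := hk ▸ hnd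
  rw [PySem.Dict.items_eq_map_keys _ hndA ([] : List ℤ),
      PySem.Dict.items_eq_map_keys _ hnd ([] : List ℤ), List.map_map, hk]
  apply List.map_congr_left
  intro k hkmem
  have hcont : ((((PySem.List.enumerate xs 0).filter (fun p : ℤ × String => decide (1 < PySem.Str.len p.2))).map (fun p : ℤ × String => (PySem.Str.slice p.2 (some 2) none, p.1 + offset))).foldl (fun (d : PySem.Dict String (List ℤ)) (q : String × ℤ) => d.modify q.1 [] (fun l => l ++ [q.2])) PySem.Dict.empty).contains k = true :=
    (PySem.Dict.contains_iff_mem_keys _ _).mpr hkmem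
  obtain ⟨hne, heq⟩ := hval k hcont
  simp only [Function.comp_apply, heq, pv_pyGetD_zero hne, pv_pyGetD_neg_one hne]
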